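-- pv_equiv track=rewrite | github.com/KimigaiiWuyi/MajsoulUID | MajsoulUID/utils/api/remote.py | encode_account_id2
-- ===== SOURCE A (Python) =====
-- def encode_account_id2(id: int) -> int:
--     p = 6139246 ^ id
--     H = 67108863
--     s = p & ~H
--     z = p & H
--     for _ in range(5):
--         z = ((511 & z) << 17) | (z >> 9)
--     return z + s + 10000000
-- ===== SOURCE B (Python) =====
-- def encode_account_id2(id: int) -> int:
--     # pure modular arithmetic instead of bit masks/shifts/rotation loop:
--     # low 26 bits = p mod 2^26; five rot-right-9 steps = one rot-left-7,
--     # expressed as divmod by 2^19.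
--     p = 6139246 ^ id
--     z = p % 67108864
--     q, r = divmod(z, 524288)
--     return r * 128 + q + (p - z) + 10000000
-- ===== Notes on version B (the rewrite author's own statement) =====
-- stated objective: alternative
-- what changed: B drops all bit-masking, shifting and the 5-iteration rotate loop: it extracts the low 26 bits as p mod 2^26 and performs the net rotation (five rot-right-9 = one rot-left-7) as a single divmod by 2^19 in plain modular arithmetic.
import Mathlib
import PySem

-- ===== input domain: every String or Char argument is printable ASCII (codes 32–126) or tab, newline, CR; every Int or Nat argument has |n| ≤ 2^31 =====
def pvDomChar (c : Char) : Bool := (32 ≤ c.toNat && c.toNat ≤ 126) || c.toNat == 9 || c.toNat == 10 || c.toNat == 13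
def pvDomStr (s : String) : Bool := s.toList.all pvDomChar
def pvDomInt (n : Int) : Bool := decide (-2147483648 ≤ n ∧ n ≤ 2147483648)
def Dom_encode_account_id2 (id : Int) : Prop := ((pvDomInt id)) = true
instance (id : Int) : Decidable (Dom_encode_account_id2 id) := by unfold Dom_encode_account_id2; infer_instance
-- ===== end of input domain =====

-- B replaces A's bit-mask extraction and 5-iteration rotate loop by plain modular
-- arithmetic: z = p mod 2^26, and the net 26-bit rotation written as one divmod by 2^19.


-- ===== PORT A =====
def encode_account_id2 (id : Int) : Int :=
  let p : Int := PySem.Int.bxor 6139246 id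
  let H : Int := 67108863
  let s : Int := PySem.Int.band p (Int.not H)
  let z : Int := PySem.Int.band p H
  let z : Int := (List.range 5).foldl
    (fun z _ => PySem.Int.bor ((PySem.Int.band 511 z) <<< (17 : Nat)) (z >>> (9 : Nat))) z
  z + s + 10000000

-- ===== PORT B =====
def encode_account_id2_alt (id : Int) : Int :=
  let p : Int := PySem.Int.bxor 6139246 id
  let z : Int := PySem.Int.mod p 67108864
  -- q, r = divmod(z, 524288); the divisor is the nonzero literal 2^19
  let q : Int := PySem.Int.floordiv z 524288
  let r : Int := PySem.Int.mod z 524288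
  r * 128 + q + (p - z) + 10000000

-- ===== PRECONDITION & SPEC =====
def Spec_encode_account_id2 (id : Int) (out : Int) : Prop := out = encode_account_id2_alt id
instance (id : Int) (out : Int) : Decidable (Spec_encode_account_id2 id out) := by unfold Spec_encode_account_id2; infer_instance

-- ===== CLAIM (what is proved, stated in full; the proofs are below) =====
def Claim_equal_encode_account_id2 : Prop := ∀ (id : Int), Dom_encode_account_id2 id → Spec_encode_account_id2 id (encode_account_id2 id)

-- ===== LEMMAS AND PROOFS =====

-- disjoint OR is addition: a low part below 2^k never collides with a shifted-left-by-k part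
theorem pv_or_add : ∀ (k a b : Nat), b < 2 ^ k → (a <<< k) ||| b = a <<< k + b := by
  intro k
  induction k with
  | zero => intro a b hb; interval_cases b; simp
  | succ k ih =>
    intro a b hb
    have hd : Nat.bit (b.testBit 0) (b >>> 1) = b := Nat.bit_testBit_zero_shiftRight_one b
    have h2 : a <<< (k+1) = Nat.bit false (a <<< k) := by
      simp [Nat.bit_val, Nat.shiftLeft_succ, Nat.mul_comm]
    have hlt : b >>> 1 < 2 ^ k := by
      rw [Nat.shiftRight_eq_div_pow]
      rw [Nat.pow_succ] at hb; omega
    rw [← hd, h2, Nat.lor_bit, ih a (b >>> 1) hlt]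
    simp only [Nat.bit_val, Bool.false_or, Nat.testBit_zero, Nat.shiftRight_eq_div_pow, pow_one]
    rcases Nat.mod_two_eq_zero_or_one b with h | h <;> simp [h] <;> omega

-- filling the low 26 bits by OR: clear them, then add the mask
theorem pv_or_mask (x : Nat) : x ||| (2^26 - 1) = x / 2^26 * 2^26 + (2^26 - 1) := by
  have hm : x / 2^26 * 2^26 + (2^26-1) = (x >>> 26) <<< 26 ||| (2^26-1) := by
    rw [pv_or_add 26 _ _ (by norm_num), Nat.shiftLeft_eq, Nat.shiftRight_eq_div_pow]
  rw [hm]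
  apply Nat.eq_of_testBit_eq; intro i
  simp only [Nat.testBit_or, Nat.testBit_shiftLeft, Nat.testBit_shiftRight,
    Nat.testBit_two_pow_sub_one]
  rcases lt_or_ge i 26 with hi|hi
  · simp [hi]
  · have h26 : ¬ i < 26 := by omega
    simp [h26, ge_iff_le, hi, Nat.add_sub_cancel' hi]

-- the two masked parts of A are p mod 2^26 and its complement p - (p mod 2^26)
theorem pv_low (p : Int) : ∃ n : Nat, n < 67108864 ∧
    PySem.Int.band p 67108863 = (n : Int) ∧
    PySem.Int.mod p 67108864 = (n : Int) ∧
    PySem.Int.band p (Int.not 67108863) = p - (n : Int) := by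
  have hnot : Int.not (67108863 : Int) = -67108864 := by decide
  have hmod : PySem.Int.mod p 67108864 = p % 67108864 :=
    PySem.Int.mod_eq_emod_of_pos (by norm_num)
  rcases le_or_gt 0 p with hp | hp
  · refine ⟨p.toNat % 67108864, by omega, ?_, ?_, ?_⟩
    · simp only [PySem.Int.band, if_pos hp, if_pos (by norm_num : (0:Int) ≤ 67108863)]
      have := Nat.and_two_pow_sub_one_eq_mod p.toNat 26
      norm_num at this
      rw [show (67108863:Int).toNat = 67108863 from rfl, this]
    · rw [hmod]; omega
    · rw [hnot]
      simp only [PySem.Int.band, if_pos hp, if_neg (by norm_num : ¬ (0:Int) ≤ -67108864)]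
      have := Nat.and_two_pow_sub_one_eq_mod p.toNat 26
      norm_num at this
      rw [show (-(-67108864:Int) - 1).toNat = 67108863 from rfl, this]
      omega
  · refine ⟨67108863 - (-p - 1).toNat % 67108864, by omega, ?_, ?_, ?_⟩
    · simp only [PySem.Int.band, if_neg (by omega : ¬ (0:Int) ≤ p),
        if_pos (by norm_num : (0:Int) ≤ 67108863)]
      rw [show (67108863:Int).toNat = 67108863 from rfl, Nat.and_comm]
      generalize hM : (-p - 1).toNat = m
      have := Nat.and_two_pow_sub_one_eq_mod m 26
      norm_num at this
      rw [this]
    · rw [hmod]; omega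
    · rw [hnot]
      simp only [PySem.Int.band, if_neg (by omega : ¬ (0:Int) ≤ p),
        if_neg (by norm_num : ¬ (0:Int) ≤ -67108864)]
      rw [show (-(-67108864:Int) - 1).toNat = 67108863 from rfl]
      generalize hM : (-p - 1).toNat = m
      have hor := pv_or_mask m
      norm_num at hor
      rw [hor]
      omega

-- one loop iteration of A, on a 26-bit Nat: a rotate-right-by-9 in arithmetic form
theorem pv_step (n : Nat) (h : n < 67108864) :
    PySem.Int.bor ((PySem.Int.band 511 (n : Int)) <<< (17 : Nat)) ((n : Int) >>> (9 : Nat))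
      = (((n % 512) * 131072 + n / 512 : Nat) : Int)
      ∧ (n % 512) * 131072 + n / 512 < 67108864 := by
  have hb : PySem.Int.band 511 (n : Int) = ((511 &&& n : Nat) : Int) := by
    rw [PySem.Int.band_of_nonneg (by norm_num) (Int.natCast_nonneg n)]
    simp
  have hmod : 511 &&& n = n % 512 := by
    rw [Nat.and_comm]
    have := Nat.and_two_pow_sub_one_eq_mod n 9
    norm_num at this
    exact this
  have hdiv : (n : Int) >>> (9 : Nat) = ((n >>> 9 : Nat) : Int) := (Int.natCast_shiftRight n 9).symm
  have hdiv' : n >>> 9 = n / 512 := by rw [Nat.shiftRight_eq_div_pow]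
  have hor : (n % 512) <<< 17 ||| n / 512 = (n % 512) <<< 17 + n / 512 :=
    pv_or_add 17 (n % 512) (n / 512) (by omega)
  have hsl : (n % 512) <<< 17 = (n % 512) * 131072 := by rw [Nat.shiftLeft_eq]
  constructor
  · rw [hb, hmod, hdiv, hdiv', ← Int.natCast_shiftLeft, PySem.Int.bor_natCast, hor, hsl]
  · omega

-- five rotate-right-by-9 steps on a 26-bit value compose to one divmod-by-2^19 rotation
theorem pv_loop (n : Nat) (hn : n < 67108864) :
    (List.range 5).foldl
      (fun z _ => PySem.Int.bor ((PySem.Int.band 511 z) <<< (17 : Nat)) (z >>> (9 : Nat))) (n : Int)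
    = (((n % 524288) * 128 + n / 524288 : Nat) : Int) := by
  have hr : List.range 5 = [0, 1, 2, 3, 4] := rfl
  rw [hr]
  simp only [List.foldl]
  set r : Nat → Nat := fun m => (m % 512) * 131072 + m / 512 with hrdef
  obtain ⟨e1, b1⟩ := pv_step n hn
  obtain ⟨e2, b2⟩ := pv_step (r n) b1
  obtain ⟨e3, b3⟩ := pv_step (r (r n)) b2
  obtain ⟨e4, b4⟩ := pv_step (r (r (r n))) b3
  obtain ⟨e5, _⟩ := pv_step (r (r (r (r n)))) b4
  rw [e1, e2, e3, e4, e5]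
  congr 1
  simp only [hrdef]
  omega

-- ===== VERDICT (by name: the statement is the Claim_ definition above) =====
theorem encode_account_id2_spec : Claim_equal_encode_account_id2 := by
  intro id _
  unfold Spec_encode_account_id2 encode_account_id2 encode_account_id2_alt
  simp only
  obtain ⟨n, hn, hb, hm, hs⟩ := pv_low (PySem.Int.bxor 6139246 id)
  have h1 : PySem.Int.mod (n : Int) 524288 = ((n % 524288 : Nat) : Int) := by
    exact_mod_cast PySem.Int.mod_natCast n 524288
  have h2 : PySem.Int.floordiv (n : Int) 524288 = ((n / 524288 : Nat) : Int) := by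
    exact_mod_cast PySem.Int.floordiv_natCast n 524288
  rw [hb, hm, hs, pv_loop n hn, h1, h2]
  push_cast
  ring
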